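-- pv_equiv track=rewrite | github.com/victorcastaneda621/python-patricia-tries | general_utils.py | radix_tree_count_sort
-- ===== SOURCE A (Python) =====
-- from collections import Counter
--
-- def radix_tree_count_sort(transaction_list: list):
--     support = Counter()
--     for t in transaction_list:
--         support.update(t)
--
--     order = {item:i for i, (item, _) in enumerate(support.most_common())}
--
--     for i in range(len(transaction_list)):
--         transaction_list[i] = sorted(transaction_list[i], key=order.get)
--
--     return transaction_list, support, order
-- ===== SOURCE B (Python) =====
-- from collections import Counter
--
-- # Counting-sort re-implementation: build the support counter in one pass over the
-- # flattened input, then sort each transaction by bucket-counting ranks instead of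
-- # a comparison sort.  Like A, it rebinds transaction_list[i] in place.
-- def radix_tree_count_sort(transaction_list: list):
--     support = Counter(item for t in transaction_list for item in t)
--     items_by_rank = [item for item, _ in support.most_common()]
--     order = {item: r for r, item in enumerate(items_by_rank)}
--     m = len(items_by_rank)
--     for i in range(len(transaction_list)):
--         counts = [0] * m
--         for item in transaction_list[i]:
--             counts[order[item]] += 1
--         rebuilt = []
--         for r in range(m):
--             rebuilt.extend([items_by_rank[r]] * counts[r])
--         transaction_list[i] = rebuilt
--     return transaction_list, support, order
-- ===== Notes on version B (the rewrite author's own statement) =====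
-- stated objective: alternative
-- what changed: support is built by one Counter() pass over the flattened input instead of per-transaction update calls, and each transaction is re-sorted by a counting sort over ranks (bucket counts per rank, rebuilt rank-by-rank) instead of Python's comparison sort with key=order.get
import Mathlib
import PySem

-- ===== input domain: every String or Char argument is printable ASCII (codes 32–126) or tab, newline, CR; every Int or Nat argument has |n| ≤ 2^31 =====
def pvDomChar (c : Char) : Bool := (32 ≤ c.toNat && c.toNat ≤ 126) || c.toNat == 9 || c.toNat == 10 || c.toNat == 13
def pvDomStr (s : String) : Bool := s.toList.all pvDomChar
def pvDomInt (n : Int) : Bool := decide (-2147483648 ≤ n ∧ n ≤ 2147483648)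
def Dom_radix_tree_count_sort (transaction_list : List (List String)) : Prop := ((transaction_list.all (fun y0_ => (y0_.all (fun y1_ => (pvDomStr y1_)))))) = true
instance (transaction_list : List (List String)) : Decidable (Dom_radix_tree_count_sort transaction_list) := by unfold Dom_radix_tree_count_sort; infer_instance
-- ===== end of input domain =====

-- B replaces the per-transaction comparison sort (key=order.get) by a counting sort over ranks
-- and builds the Counter in one pass over the flattened list; equivalence is about the RETURN
-- value (both Pythons also rebind transaction_list[i] in place with the same lists).

-- ===== PORT A =====
def radix_tree_count_sort (transaction_list : List (List String)) :
    List (List String) × (List (String × Int)) × (List (String × Int)) :=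
  -- support = Counter(); for t in transaction_list: support.update(t)
  let support := transaction_list.foldl
    (fun d t => t.foldl (fun d x => d.modify x 0 (· + 1)) d) PySem.Dict.empty
  -- order = {item: i for i, (item, _) in enumerate(support.most_common())}
  -- (most_common() is sorted(items, key=count, reverse=True), stable)
  let order := PySem.Dict.ofList
    ((PySem.List.enumerate (PySem.List.sorted support.items (fun p => p.2) true)).map
      (fun p => (p.2.1, p.1)))
  -- transaction_list[i] = sorted(transaction_list[i], key=order.get); every item occurs in
  -- order, so order.get never returns None: getD 0 is exact here
  let out := transaction_list.map
    (fun t => PySem.List.sorted t (fun s => order.getD s 0) false)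
  (out, support.items, order.items)

-- ===== PORT B =====
def radix_tree_count_sort_alt (transaction_list : List (List String)) :
    List (List String) × (List (String × Int)) × (List (String × Int)) :=
  -- support = Counter(item for t in transaction_list for item in t)
  let support := PySem.Dict.counter transaction_list.flatten
  -- items_by_rank = [item for item, _ in support.most_common()]
  let items_by_rank := (PySem.List.sorted support.items (fun p => p.2) true).map (fun p => p.1)
  -- order = {item: r for r, item in enumerate(items_by_rank)}
  let order := PySem.Dict.ofList
    ((PySem.List.enumerate items_by_rank).map (fun p => (p.2, p.1)))
  let m := items_by_rank.length
  let out := transaction_list.map (fun t =>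
    -- counts = [0]*m; for item in t: counts[order[item]] += 1
    -- (order[item] always hits: every item is a key of order, and its rank is a
    --  nonnegative in-range index, so getD/toNat/set are exact here)
    let counts := t.foldl
      (fun c x => c.set ((order.getD x 0).toNat) (c.getD ((order.getD x 0).toNat) 0 + 1))
      (PySem.List.pyRepeat [(0 : Int)] (m : Int))
    -- rebuilt = []; for r in range(m): rebuilt.extend([items_by_rank[r]] * counts[r])
    (PySem.List.pyRange 0 (m : Int)).foldl
      (fun acc r => acc ++ PySem.List.pyRepeat [items_by_rank.getD r.toNat ""]
        (counts.getD r.toNat 0)) [])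
  (out, support.items, order.items)

-- ===== PRECONDITION & SPEC =====
def Spec_radix_tree_count_sort (transaction_list : List (List String)) (out : List (List String) × (List (String × Int)) × (List (String × Int))) : Prop := out = radix_tree_count_sort_alt transaction_list
instance (transaction_list : List (List String)) (out : List (List String) × (List (String × Int)) × (List (String × Int))) : Decidable (Spec_radix_tree_count_sort transaction_list out) := by unfold Spec_radix_tree_count_sort; infer_instance

-- ===== CLAIM (what is proved, stated in full; the proofs are below) =====
def Claim_equal_radix_tree_count_sort : Prop := ∀ (transaction_list : List (List String)), Dom_radix_tree_count_sort transaction_list → Spec_radix_tree_count_sort transaction_list (radix_tree_count_sort transaction_list)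

-- ===== LEMMAS AND PROOFS =====

lemma pv_enumerate_cons {α : Type} (x : α) (l : List α) (s : Int) :
    PySem.List.enumerate (x :: l) s = (s, x) :: PySem.List.enumerate l (s + 1) := by
  simp [PySem.List.enumerate]

lemma pv_enumerate_map_snd {α : Type} (l : List α) :
    ∀ s : Int, (PySem.List.enumerate l s).map (fun p => p.2) = l := by
  induction l with
  | nil => intro s; simp [PySem.List.enumerate]
  | cons x l ih => intro s; rw [pv_enumerate_cons]; simp [ih]

lemma pv_enumerate_map {α β : Type} (f : α → β) (l : List α) :
    ∀ s : Int, PySem.List.enumerate (l.map f) s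
      = (PySem.List.enumerate l s).map (fun p => (p.1, f p.2)) := by
  induction l with
  | nil => intro s; simp [PySem.List.enumerate]
  | cons x l ih => intro s; simp [ih]

lemma pv_mem_enumerate {α : Type} (l : List α) :
    ∀ (s : Int) (j : Nat) (hj : j < l.length), (s + j, l[j]) ∈ PySem.List.enumerate l s := by
  induction l with
  | nil => intro s j hj; simp at hj
  | cons x l ih =>
    intro s j hj
    rw [pv_enumerate_cons]
    cases j with
    | zero => simp
    | succ j =>
      have h := ih (s + 1) j (by simpa using Nat.lt_of_succ_lt_succ hj)
      have : s + ((j : Int) + 1) = s + 1 + j := by ring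
      refine List.mem_cons_of_mem _ ?_
      simpa [this] using h

lemma pv_pairs_eq (mc : List (String × Int)) :
    (PySem.List.enumerate mc).map (fun p => (p.2.1, p.1))
      = (PySem.List.enumerate (mc.map (fun p => p.1))).map (fun p => (p.2, p.1)) := by
  rw [pv_enumerate_map, List.map_map]; rfl

def pvRankDict (l : List String) : PySem.Dict String Int :=
  PySem.Dict.ofList ((PySem.List.enumerate l).map (fun p => (p.2, p.1)))

def pvChunks (names t : List String) : List String :=
  names.flatMap (fun nm => List.replicate (t.count nm) nm)

lemma pv_rankDict_items (l : List String) (hnd : l.Nodup) :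
    (pvRankDict l).items = (PySem.List.enumerate l).map (fun p => (p.2, p.1)) := by
  have hfold : pvRankDict l
      = (PySem.List.enumerate l).foldl (fun d a => d.insert a.2 a.1) PySem.Dict.empty := by
    show PySem.Dict.ofList _ = _
    rw [show ∀ ps : List (String × Int),
        PySem.Dict.ofList ps = ps.foldl (fun d p => d.insert p.1 p.2) PySem.Dict.empty
      from fun _ => rfl, List.foldl_map]
  rw [hfold,
    PySem.Dict.items_foldl_insert_fresh _ _ _ _ (fun a _ => PySem.Dict.contains_empty _)
      (by rw [pv_enumerate_map_snd]; exact hnd)]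
  simp [PySem.Dict.empty]

lemma pv_rank_getElem (l : List String) (hnd : l.Nodup) (j : Nat) (hj : j < l.length) :
    (pvRankDict l).getD l[j] 0 = (j : Int) := by
  have hmem : (l[j], (j : Int)) ∈ (PySem.List.enumerate l).map (fun p => (p.2, p.1)) := by
    refine List.mem_map.2 ⟨((0 : Int) + j, l[j]), pv_mem_enumerate l 0 j hj, by simp⟩
  rw [← pv_rankDict_items l hnd] at hmem
  exact PySem.Dict.getD_of_get?_eq_some _ 0
    (PySem.Dict.get?_of_mem_items _ hmem (PySem.Dict.nodup_keys_ofList _))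

lemma pv_rank_inj (l : List String) (hnd : l.Nodup) (a b : String)
    (ha : a ∈ l) (hb : b ∈ l)
    (h : (pvRankDict l).getD a 0 = (pvRankDict l).getD b 0) : a = b := by
  obtain ⟨i, hi, rfl⟩ := List.mem_iff_getElem.1 ha
  obtain ⟨j, hj, rfl⟩ := List.mem_iff_getElem.1 hb
  rw [pv_rank_getElem l hnd i hi, pv_rank_getElem l hnd j hj] at h
  have : i = j := by exact_mod_cast h
  simp [this]

lemma pv_sum_if (t : List String) (v : String) :
    ∀ l : List String, l.Nodup →
      ((l.map (fun nm => if (nm == v) = true then t.count nm else 0)).sum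
        = if v ∈ l then t.count v else 0) := by
  intro l
  induction l with
  | nil => intro _; simp
  | cons a l ih =>
    intro hnd
    rw [List.map_cons, List.sum_cons, ih hnd.of_cons]
    by_cases hav : a = v
    · subst hav
      have hnl : a ∉ l := (List.nodup_cons.1 hnd).1
      simp [hnl]
    · simp [hav, beq_iff_eq, List.mem_cons, Ne.symm hav]

lemma pv_chunks_count (names : List String) (hnd : names.Nodup) (t : List String)
    (ht : ∀ x ∈ t, x ∈ names) (v : String) :
    (pvChunks names t).count v = t.count v := by
  unfold pvChunks
  rw [List.count_flatMap]
  have hmap : (names.map (List.count v ∘ fun nm => List.replicate (t.count nm) nm))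
      = names.map (fun nm => if (nm == v) = true then t.count nm else 0) := by
    refine List.map_congr_left fun nm _ => ?_
    simp [List.count_replicate]
  rw [hmap, pv_sum_if t v names hnd]
  split_ifs with h
  · rfl
  · exact (List.count_eq_zero.2 fun hv => h (ht v hv)).symm

lemma pv_chunks_perm (names : List String) (hnd : names.Nodup) (t : List String)
    (ht : ∀ x ∈ t, x ∈ names) : (pvChunks names t).Perm t :=
  List.perm_iff_count.2 fun v => pv_chunks_count names hnd t ht v

lemma pv_chunks_pairwise (key : String → Int) (n : String → Nat) :
    ∀ (l : List String), l.Pairwise (fun a b => key a ≤ key b) →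
      (l.flatMap (fun a => List.replicate (n a) a)).Pairwise (fun a b => key a ≤ key b) := by
  intro l
  induction l with
  | nil => intro _; simp
  | cons a l ih =>
    intro hp
    rw [List.flatMap_cons, List.pairwise_append]
    refine ⟨List.pairwise_replicate.2 (Or.inr le_rfl), ih (List.pairwise_cons.1 hp).2, ?_⟩
    intro x hx y hy
    obtain rfl := List.eq_of_mem_replicate hx
    obtain ⟨b, hb, hyb⟩ := List.mem_flatMap.1 hy
    obtain rfl := List.eq_of_mem_replicate hyb
    exact (List.pairwise_cons.1 hp).1 _ hb

lemma pv_names_pairwise (names : List String) (hnd : names.Nodup) :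
    names.Pairwise (fun a b => (pvRankDict names).getD a 0 ≤ (pvRankDict names).getD b 0) := by
  rw [List.pairwise_iff_getElem]
  intro i j hi hj hij
  rw [pv_rank_getElem names hnd i hi, pv_rank_getElem names hnd j hj]
  exact_mod_cast Nat.le_of_lt hij

lemma pv_sorted_eq_chunks (names : List String) (hnd : names.Nodup) (t : List String)
    (ht : ∀ x ∈ t, x ∈ names) :
    PySem.List.sorted t (fun s => (pvRankDict names).getD s 0) false = pvChunks names t := by
  refine List.Perm.eq_of_pairwise
    (le := fun a b => (pvRankDict names).getD a 0 ≤ (pvRankDict names).getD b 0) ?anti ?p1 ?p2 ?perm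
  case anti =>
    intro a b ha hb h1 h2
    refine pv_rank_inj names hnd a b ?_ ?_ (le_antisymm h1 h2)
    · exact ht a ((PySem.List.sorted_perm t _ false).mem_iff.1 ha)
    · obtain ⟨nm, hnm, hb'⟩ := List.mem_flatMap.1 hb
      obtain rfl := List.eq_of_mem_replicate hb'
      exact hnm
  case p1 => exact PySem.List.sorted_pairwise t _
  case p2 => exact pv_chunks_pairwise _ _ names (pv_names_pairwise names hnd)
  case perm => exact (PySem.List.sorted_perm t _ false).trans (pv_chunks_perm names hnd t ht).symm

lemma pv_counts_fold (idx : String → Nat) :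
    ∀ (t : List String) (counts : List Int), (∀ x ∈ t, idx x < counts.length) →
      ∀ r : Nat, (t.foldl (fun c x => c.set (idx x) (c.getD (idx x) 0 + 1)) counts).getD r 0
        = counts.getD r 0 + (t.countP (fun x => idx x == r) : Int) := by
  intro t
  induction t with
  | nil => intro counts _ r; simp
  | cons x t ih =>
    intro counts h r
    rw [List.foldl_cons]
    have hx : idx x < counts.length := h x List.mem_cons_self
    have h' : ∀ y ∈ t, idx y < (counts.set (idx x) (counts.getD (idx x) 0 + 1)).length := by
      intro y hy; rw [List.length_set]; exact h y (List.mem_cons_of_mem _ hy)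
    rw [ih _ h' r, List.countP_cons]
    by_cases hr : idx x = r
    · subst hr
      rw [List.getD_eq_getElem?_getD, List.getElem?_set, if_pos rfl, if_pos hx]
      simp [List.getD_eq_getElem?_getD]
      omega
    · rw [List.getD_eq_getElem?_getD, List.getElem?_set, if_neg hr,
        ← List.getD_eq_getElem?_getD]
      simp [hr]

lemma pv_flatMap_range_getD {β : Type} (h : String → List β) (d : String) :
    ∀ (l : List String),
      (List.range l.length).flatMap (fun i => h (l.getD i d)) = l.flatMap h := by
  intro l
  induction l with
  | nil => simp
  | cons a t ih =>
    rw [List.length_cons, List.range_succ_eq_map, List.flatMap_cons, List.flatMap_map]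
    simp only [List.getD_cons_zero, List.getD_cons_succ, Nat.succ_eq_add_one]
    rw [ih, List.flatMap_cons]

lemma pv_counting_eq_chunks (names : List String) (hnd : names.Nodup) (t : List String)
    (ht : ∀ x ∈ t, x ∈ names) :
    ((PySem.List.pyRange 0 (names.length : Int)).foldl
      (fun acc r => acc ++ PySem.List.pyRepeat [names.getD r.toNat ""]
        ((t.foldl (fun c x => c.set ((pvRankDict names).getD x 0).toNat
            (c.getD ((pvRankDict names).getD x 0).toNat 0 + 1))
          (PySem.List.pyRepeat [(0 : Int)] (names.length : Int))).getD r.toNat 0)) [])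
      = pvChunks names t := by
  have hidx : ∀ x ∈ t, ((pvRankDict names).getD x 0).toNat < names.length := by
    intro x hx
    obtain ⟨j, hj, rfl⟩ := List.mem_iff_getElem.1 (ht x hx)
    rw [pv_rank_getElem names hnd j hj]
    simpa using hj
  rw [PySem.List.pyRange_zero_natCast, List.foldl_map,
    PySem.List.foldl_append_eq_flatMap, List.nil_append, List.flatMap_def]
  have hbody : ∀ i ∈ List.range names.length,
      PySem.List.pyRepeat [names.getD ((i : Int)).toNat ""]
        ((t.foldl (fun c x => c.set ((pvRankDict names).getD x 0).toNat
            (c.getD ((pvRankDict names).getD x 0).toNat 0 + 1))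
          (PySem.List.pyRepeat [(0 : Int)] (names.length : Int))).getD ((i : Int)).toNat 0)
      = List.replicate (t.count (names.getD i "")) (names.getD i "") := by
    intro i hi
    have him : i < names.length := List.mem_range.1 hi
    rw [PySem.List.pyRepeat_singleton, Int.toNat_natCast,
      show PySem.List.pyRepeat [(0 : Int)] (names.length : Int)
        = List.replicate names.length (0 : Int) by
          rw [PySem.List.pyRepeat_singleton, Int.toNat_natCast],
      pv_counts_fold _ t _ (by simpa using hidx) i,
      List.getD_replicate _ him, zero_add]
    have hcp : t.countP (fun x => ((pvRankDict names).getD x 0).toNat == i)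
        = t.count (names.getD i "") := by
      rw [List.count_eq_countP]
      refine List.countP_congr fun x hx => ?_
      simp only [beq_iff_eq]
      constructor
      · intro hxi
        obtain ⟨j, hj, rfl⟩ := List.mem_iff_getElem.1 (ht x hx)
        rw [pv_rank_getElem names hnd j hj, Int.toNat_natCast] at hxi
        subst hxi
        rw [List.getD_eq_getElem _ _ him]
      · intro hxv
        rw [hxv, List.getD_eq_getElem _ _ him, pv_rank_getElem names hnd i him,
          Int.toNat_natCast]
    rw [hcp, Int.toNat_natCast]
  rw [List.map_congr_left hbody, ← List.flatMap_def,
    pv_flatMap_range_getD (fun nm => List.replicate (t.count nm) nm) "" names]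
  rfl

-- ===== VERDICT (by name: the statement is the Claim_ definition above) =====
theorem radix_tree_count_sort_spec : Claim_equal_radix_tree_count_sort := by
  intro tl _
  unfold Spec_radix_tree_count_sort radix_tree_count_sort radix_tree_count_sort_alt
  simp only []
  have hsup : tl.foldl (fun d t => t.foldl (fun d x => d.modify x 0 (· + 1)) d) PySem.Dict.empty
      = PySem.Dict.counter tl.flatten := by
    rw [PySem.Dict.counter_eq_foldl, List.foldl_flatten]
  rw [hsup, pv_pairs_eq]
  set sup := PySem.Dict.counter tl.flatten with hsupdef
  set names := (PySem.List.sorted sup.items (fun p => p.2) true).map (fun p => p.1) with hnames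
  have hperm : names.Perm (PySem.Set.ofList tl.flatten) := by
    rw [← PySem.Dict.keys_counter tl.flatten]
    exact (PySem.List.sorted_perm sup.items (fun p => p.2) true).map (fun p => p.1)
  have hnd : names.Nodup := hperm.nodup_iff.2 (PySem.Set.nodup_ofList _)
  have hcov : ∀ t ∈ tl, ∀ x ∈ t, x ∈ names := by
    intro t htl x hx
    exact hperm.mem_iff.2 ((PySem.Set.mem_ofList _ _).2 (List.mem_flatten.2 ⟨t, htl, hx⟩))
  refine congrArg (fun o => (o, sup.items,
    (PySem.Dict.ofList ((PySem.List.enumerate names).map (fun p => (p.2, p.1)))).items)) ?_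
  refine List.map_congr_left fun t htl => ?_
  rw [show PySem.Dict.ofList ((PySem.List.enumerate names).map (fun p => (p.2, p.1)))
      = pvRankDict names from rfl,
    show names.length = names.length from rfl]
  rw [pv_sorted_eq_chunks names hnd t (hcov t htl)]
  exact (pv_counting_eq_chunks names hnd t (hcov t htl)).symm
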